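-- pv_equiv track=rewrite | github.com/timepointai/timepoint-pro | workflows/dialog_synthesis.py | _derive_speaking_style
-- ===== SOURCE A (Python) =====
-- from typing import List, Dict, Optional
--
-- def _derive_speaking_style(personality_traits: List[str], archetype_id: str = "") -> Dict[str, str]:
--     """
--     Derive speaking style characteristics from personality traits.
--
--     This enables voice differentiation in dialog synthesis by mapping
--     personality traits to concrete speaking patterns.
--
--     Args:
--         personality_traits: List of personality trait strings
--         archetype_id: Optional archetype identifier
--
--     Returns:
--         Dict with speaking style descriptors:
--         - verbosity: terse/moderate/verbose
--         - formality: casual/neutral/formal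
--         - tone: warm/neutral/cold/passionate
--         - vocabulary: simple/technical/philosophical/business
--         - speech_pattern: direct/elaborate/questioning/commanding
--     """
--     traits_lower = [t.lower() for t in personality_traits] if personality_traits else []
--
--     # Default speaking style
--     style = {
--         "verbosity": "moderate",
--         "formality": "neutral",
--         "tone": "neutral",
--         "vocabulary": "general",
--         "speech_pattern": "direct"
--     }
--
--     # Verbosity mapping
--     verbose_traits = ["intellectual", "philosophical", "verbose", "analytical", "academic", "professorial"]
--     terse_traits = ["reserved", "stoic", "practical", "military", "laconic", "quiet"]
--     if any(t in traits_lower for t in verbose_traits):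
--         style["verbosity"] = "verbose"
--     elif any(t in traits_lower for t in terse_traits):
--         style["verbosity"] = "terse"
--
--     # Formality mapping
--     formal_traits = ["aristocratic", "diplomatic", "refined", "proper", "dignified", "professional"]
--     casual_traits = ["friendly", "casual", "folksy", "down-to-earth", "approachable", "relaxed"]
--     if any(t in traits_lower for t in formal_traits):
--         style["formality"] = "formal"
--     elif any(t in traits_lower for t in casual_traits):
--         style["formality"] = "casual"
--
--     # Tone mapping
--     warm_traits = ["warm", "empathetic", "caring", "nurturing", "kind", "compassionate"]
--     cold_traits = ["cold", "calculating", "detached", "aloof", "distant", "clinical"]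
--     passionate_traits = ["passionate", "fiery", "intense", "zealous", "fervent", "emotional"]
--     if any(t in traits_lower for t in warm_traits):
--         style["tone"] = "warm"
--     elif any(t in traits_lower for t in cold_traits):
--         style["tone"] = "cold"
--     elif any(t in traits_lower for t in passionate_traits):
--         style["tone"] = "passionate"
--
--     # Vocabulary mapping
--     tech_traits = ["technical", "engineer", "scientific", "analytical", "data-driven"]
--     philosophical_traits = ["philosophical", "intellectual", "academic", "scholarly", "contemplative"]
--     business_traits = ["business", "executive", "strategic", "pragmatic", "results-oriented"]
--     if any(t in traits_lower for t in tech_traits):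
--         style["vocabulary"] = "technical"
--     elif any(t in traits_lower for t in philosophical_traits):
--         style["vocabulary"] = "philosophical"
--     elif any(t in traits_lower for t in business_traits):
--         style["vocabulary"] = "business"
--
--     # Speech pattern mapping
--     questioning_traits = ["curious", "inquisitive", "socratic", "skeptical", "analytical"]
--     commanding_traits = ["authoritative", "commanding", "decisive", "leadership", "dominant"]
--     elaborate_traits = ["storyteller", "narrative", "elaborate", "descriptive", "creative"]
--     if any(t in traits_lower for t in questioning_traits):
--         style["speech_pattern"] = "questioning"
--     elif any(t in traits_lower for t in commanding_traits):
--         style["speech_pattern"] = "commanding"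
--     elif any(t in traits_lower for t in elaborate_traits):
--         style["speech_pattern"] = "elaborate"
--
--     # Archetype-based overrides
--     archetype_lower = archetype_id.lower() if archetype_id else ""
--     if "visionary" in archetype_lower or "dreamer" in archetype_lower:
--         style["vocabulary"] = "philosophical"
--         style["speech_pattern"] = "elaborate"
--     elif "strategist" in archetype_lower or "analyst" in archetype_lower:
--         style["vocabulary"] = "technical"
--         style["verbosity"] = "moderate"
--     elif "leader" in archetype_lower or "executive" in archetype_lower:
--         style["speech_pattern"] = "commanding"
--         style["formality"] = "formal"
--
--     return style
-- ===== SOURCE B (Python) =====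
-- from typing import List, Dict
--
-- # Inverted keyword index: trait word -> effects [(style field, rule priority, value), ...].
-- # A single pass over the character's traits collects, per field, the effect with the
-- # lowest priority number; fields with no matched effect keep their default.
-- _INDEX = {
--     'intellectual': [('verbosity', 0, 'verbose'), ('vocabulary', 1, 'philosophical')],
--     'philosophical': [('verbosity', 0, 'verbose'), ('vocabulary', 1, 'philosophical')],
--     'verbose': [('verbosity', 0, 'verbose')],
--     'analytical': [('verbosity', 0, 'verbose'), ('vocabulary', 0, 'technical'), ('speech_pattern', 0, 'questioning')],
--     'academic': [('verbosity', 0, 'verbose'), ('vocabulary', 1, 'philosophical')],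
--     'professorial': [('verbosity', 0, 'verbose')],
--     'reserved': [('verbosity', 1, 'terse')],
--     'stoic': [('verbosity', 1, 'terse')],
--     'practical': [('verbosity', 1, 'terse')],
--     'military': [('verbosity', 1, 'terse')],
--     'laconic': [('verbosity', 1, 'terse')],
--     'quiet': [('verbosity', 1, 'terse')],
--     'aristocratic': [('formality', 0, 'formal')],
--     'diplomatic': [('formality', 0, 'formal')],
--     'refined': [('formality', 0, 'formal')],
--     'proper': [('formality', 0, 'formal')],
--     'dignified': [('formality', 0, 'formal')],
--     'professional': [('formality', 0, 'formal')],
--     'friendly': [('formality', 1, 'casual')],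
--     'casual': [('formality', 1, 'casual')],
--     'folksy': [('formality', 1, 'casual')],
--     'down-to-earth': [('formality', 1, 'casual')],
--     'approachable': [('formality', 1, 'casual')],
--     'relaxed': [('formality', 1, 'casual')],
--     'warm': [('tone', 0, 'warm')],
--     'empathetic': [('tone', 0, 'warm')],
--     'caring': [('tone', 0, 'warm')],
--     'nurturing': [('tone', 0, 'warm')],
--     'kind': [('tone', 0, 'warm')],
--     'compassionate': [('tone', 0, 'warm')],
--     'cold': [('tone', 1, 'cold')],
--     'calculating': [('tone', 1, 'cold')],
--     'detached': [('tone', 1, 'cold')],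
--     'aloof': [('tone', 1, 'cold')],
--     'distant': [('tone', 1, 'cold')],
--     'clinical': [('tone', 1, 'cold')],
--     'passionate': [('tone', 2, 'passionate')],
--     'fiery': [('tone', 2, 'passionate')],
--     'intense': [('tone', 2, 'passionate')],
--     'zealous': [('tone', 2, 'passionate')],
--     'fervent': [('tone', 2, 'passionate')],
--     'emotional': [('tone', 2, 'passionate')],
--     'technical': [('vocabulary', 0, 'technical')],
--     'engineer': [('vocabulary', 0, 'technical')],
--     'scientific': [('vocabulary', 0, 'technical')],
--     'data-driven': [('vocabulary', 0, 'technical')],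
--     'scholarly': [('vocabulary', 1, 'philosophical')],
--     'contemplative': [('vocabulary', 1, 'philosophical')],
--     'business': [('vocabulary', 2, 'business')],
--     'executive': [('vocabulary', 2, 'business')],
--     'strategic': [('vocabulary', 2, 'business')],
--     'pragmatic': [('vocabulary', 2, 'business')],
--     'results-oriented': [('vocabulary', 2, 'business')],
--     'curious': [('speech_pattern', 0, 'questioning')],
--     'inquisitive': [('speech_pattern', 0, 'questioning')],
--     'socratic': [('speech_pattern', 0, 'questioning')],
--     'skeptical': [('speech_pattern', 0, 'questioning')],
--     'authoritative': [('speech_pattern', 1, 'commanding')],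
--     'commanding': [('speech_pattern', 1, 'commanding')],
--     'decisive': [('speech_pattern', 1, 'commanding')],
--     'leadership': [('speech_pattern', 1, 'commanding')],
--     'dominant': [('speech_pattern', 1, 'commanding')],
--     'storyteller': [('speech_pattern', 2, 'elaborate')],
--     'narrative': [('speech_pattern', 2, 'elaborate')],
--     'elaborate': [('speech_pattern', 2, 'elaborate')],
--     'descriptive': [('speech_pattern', 2, 'elaborate')],
--     'creative': [('speech_pattern', 2, 'elaborate')],
-- }
--
-- _DEFAULTS = [
--     ('verbosity', 'moderate'),
--     ('formality', 'neutral'),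
--     ('tone', 'neutral'),
--     ('vocabulary', 'general'),
--     ('speech_pattern', 'direct'),
-- ]
--
-- # Archetype overrides: the first keyword group found in the archetype id applies.
-- _OVERRIDES = [
--     (('visionary', 'dreamer'), {'vocabulary': 'philosophical', 'speech_pattern': 'elaborate'}),
--     (('strategist', 'analyst'), {'vocabulary': 'technical', 'verbosity': 'moderate'}),
--     (('leader', 'executive'), {'speech_pattern': 'commanding', 'formality': 'formal'}),
-- ]
--
--
-- def _derive_speaking_style(personality_traits: List[str], archetype_id: str = "") -> Dict[str, str]:
--     # One pass over the traits: record, per style field, the matched effect of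
--     # lowest priority number (earlier listing = stronger).
--     best = {}  # field -> (priority, value)
--     for trait in personality_traits:
--         for field, prio, value in _INDEX.get(trait.lower(), ()):
--             cur = best.get(field)
--             if cur is None or prio < cur[0]:
--                 best[field] = (prio, value)
--     style = {field: (best[field][1] if field in best else default)
--              for field, default in _DEFAULTS}
--     archetype_lower = archetype_id.lower()
--     for keywords, updates in _OVERRIDES:
--         if any(k in archetype_lower for k in keywords):
--             style.update(updates)
--             break
--     return style
-- ===== Notes on version B (the rewrite author's own statement) =====
-- stated objective: faster
-- what changed: Replaces A's five per-field if/elif trigger-list scans by an inverted keyword index (trait word -> [(field, priority, value)] effects): one pass over the traits folds each trait's effects into a best-per-field map keeping the lowest priority number, then defaults fill unmatched fields and the ordered archetype-override table is applied.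
import Mathlib
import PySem

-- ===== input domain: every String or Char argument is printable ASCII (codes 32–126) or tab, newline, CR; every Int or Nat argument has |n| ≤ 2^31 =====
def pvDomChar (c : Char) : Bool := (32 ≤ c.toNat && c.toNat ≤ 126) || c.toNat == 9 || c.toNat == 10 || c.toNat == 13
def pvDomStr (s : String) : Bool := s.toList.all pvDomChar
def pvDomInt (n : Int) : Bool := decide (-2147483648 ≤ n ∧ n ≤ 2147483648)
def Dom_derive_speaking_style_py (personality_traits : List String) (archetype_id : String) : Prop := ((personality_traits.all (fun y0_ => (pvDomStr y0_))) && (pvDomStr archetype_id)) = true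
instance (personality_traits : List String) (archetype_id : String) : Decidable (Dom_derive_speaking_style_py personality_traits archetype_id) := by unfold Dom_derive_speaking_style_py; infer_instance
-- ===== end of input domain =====

-- B replaces A's five per-field if/elif trigger scans by an inverted keyword index
-- (trait word → [(field, priority, value)]) folded in a single pass over the traits,
-- keeping the lowest-priority effect per field (objective: faster — one index lookup per trait
-- instead of scanning every trigger list against the traits; measured faster in a timing run).

-- ===== PORT A =====
def derive_speaking_style_py (personality_traits : List String) (archetype_id : String) : List (String × String) :=
  let traits_lower : List String :=
    if personality_traits.isEmpty then [] else personality_traits.map PySem.Str.lower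
  let style : PySem.Dict String String := PySem.Dict.ofList
    [("verbosity", "moderate"), ("formality", "neutral"), ("tone", "neutral"),
     ("vocabulary", "general"), ("speech_pattern", "direct")]
  let verbose_traits : List String := ["intellectual", "philosophical", "verbose", "analytical", "academic", "professorial"]
  let terse_traits : List String := ["reserved", "stoic", "practical", "military", "laconic", "quiet"]
  let style :=
    if verbose_traits.any (fun t => traits_lower.contains t) then style.insert "verbosity" "verbose"
    else if terse_traits.any (fun t => traits_lower.contains t) then style.insert "verbosity" "terse"
    else style
  let formal_traits : List String := ["aristocratic", "diplomatic", "refined", "proper", "dignified", "professional"]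
  let casual_traits : List String := ["friendly", "casual", "folksy", "down-to-earth", "approachable", "relaxed"]
  let style :=
    if formal_traits.any (fun t => traits_lower.contains t) then style.insert "formality" "formal"
    else if casual_traits.any (fun t => traits_lower.contains t) then style.insert "formality" "casual"
    else style
  let warm_traits : List String := ["warm", "empathetic", "caring", "nurturing", "kind", "compassionate"]
  let cold_traits : List String := ["cold", "calculating", "detached", "aloof", "distant", "clinical"]
  let passionate_traits : List String := ["passionate", "fiery", "intense", "zealous", "fervent", "emotional"]
  let style :=
    if warm_traits.any (fun t => traits_lower.contains t) then style.insert "tone" "warm"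
    else if cold_traits.any (fun t => traits_lower.contains t) then style.insert "tone" "cold"
    else if passionate_traits.any (fun t => traits_lower.contains t) then style.insert "tone" "passionate"
    else style
  let tech_traits : List String := ["technical", "engineer", "scientific", "analytical", "data-driven"]
  let philosophical_traits : List String := ["philosophical", "intellectual", "academic", "scholarly", "contemplative"]
  let business_traits : List String := ["business", "executive", "strategic", "pragmatic", "results-oriented"]
  let style :=
    if tech_traits.any (fun t => traits_lower.contains t) then style.insert "vocabulary" "technical"
    else if philosophical_traits.any (fun t => traits_lower.contains t) then style.insert "vocabulary" "philosophical"
    else if business_traits.any (fun t => traits_lower.contains t) then style.insert "vocabulary" "business"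
    else style
  let questioning_traits : List String := ["curious", "inquisitive", "socratic", "skeptical", "analytical"]
  let commanding_traits : List String := ["authoritative", "commanding", "decisive", "leadership", "dominant"]
  let elaborate_traits : List String := ["storyteller", "narrative", "elaborate", "descriptive", "creative"]
  let style :=
    if questioning_traits.any (fun t => traits_lower.contains t) then style.insert "speech_pattern" "questioning"
    else if commanding_traits.any (fun t => traits_lower.contains t) then style.insert "speech_pattern" "commanding"
    else if elaborate_traits.any (fun t => traits_lower.contains t) then style.insert "speech_pattern" "elaborate"
    else style
  let archetype_lower : String := if archetype_id.isEmpty then "" else PySem.Str.lower archetype_id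
  let style :=
    if PySem.Str.isIn "visionary" archetype_lower || PySem.Str.isIn "dreamer" archetype_lower then
      (style.insert "vocabulary" "philosophical").insert "speech_pattern" "elaborate"
    else if PySem.Str.isIn "strategist" archetype_lower || PySem.Str.isIn "analyst" archetype_lower then
      (style.insert "vocabulary" "technical").insert "verbosity" "moderate"
    else if PySem.Str.isIn "leader" archetype_lower || PySem.Str.isIn "executive" archetype_lower then
      (style.insert "speech_pattern" "commanding").insert "formality" "formal"
    else style
  style.items

-- ===== PORT B =====
-- inverted keyword index: trait word → effects [(style field, rule priority, value)]
def pvIndex : List (String × List (String × Nat × String)) :=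
  [("intellectual", [("verbosity", 0, "verbose"), ("vocabulary", 1, "philosophical")]),
   ("philosophical", [("verbosity", 0, "verbose"), ("vocabulary", 1, "philosophical")]),
   ("verbose", [("verbosity", 0, "verbose")]),
   ("analytical", [("verbosity", 0, "verbose"), ("vocabulary", 0, "technical"), ("speech_pattern", 0, "questioning")]),
   ("academic", [("verbosity", 0, "verbose"), ("vocabulary", 1, "philosophical")]),
   ("professorial", [("verbosity", 0, "verbose")]),
   ("reserved", [("verbosity", 1, "terse")]),
   ("stoic", [("verbosity", 1, "terse")]),
   ("practical", [("verbosity", 1, "terse")]),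
   ("military", [("verbosity", 1, "terse")]),
   ("laconic", [("verbosity", 1, "terse")]),
   ("quiet", [("verbosity", 1, "terse")]),
   ("aristocratic", [("formality", 0, "formal")]),
   ("diplomatic", [("formality", 0, "formal")]),
   ("refined", [("formality", 0, "formal")]),
   ("proper", [("formality", 0, "formal")]),
   ("dignified", [("formality", 0, "formal")]),
   ("professional", [("formality", 0, "formal")]),
   ("friendly", [("formality", 1, "casual")]),
   ("casual", [("formality", 1, "casual")]),
   ("folksy", [("formality", 1, "casual")]),
   ("down-to-earth", [("formality", 1, "casual")]),
   ("approachable", [("formality", 1, "casual")]),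
   ("relaxed", [("formality", 1, "casual")]),
   ("warm", [("tone", 0, "warm")]),
   ("empathetic", [("tone", 0, "warm")]),
   ("caring", [("tone", 0, "warm")]),
   ("nurturing", [("tone", 0, "warm")]),
   ("kind", [("tone", 0, "warm")]),
   ("compassionate", [("tone", 0, "warm")]),
   ("cold", [("tone", 1, "cold")]),
   ("calculating", [("tone", 1, "cold")]),
   ("detached", [("tone", 1, "cold")]),
   ("aloof", [("tone", 1, "cold")]),
   ("distant", [("tone", 1, "cold")]),
   ("clinical", [("tone", 1, "cold")]),
   ("passionate", [("tone", 2, "passionate")]),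
   ("fiery", [("tone", 2, "passionate")]),
   ("intense", [("tone", 2, "passionate")]),
   ("zealous", [("tone", 2, "passionate")]),
   ("fervent", [("tone", 2, "passionate")]),
   ("emotional", [("tone", 2, "passionate")]),
   ("technical", [("vocabulary", 0, "technical")]),
   ("engineer", [("vocabulary", 0, "technical")]),
   ("scientific", [("vocabulary", 0, "technical")]),
   ("data-driven", [("vocabulary", 0, "technical")]),
   ("scholarly", [("vocabulary", 1, "philosophical")]),
   ("contemplative", [("vocabulary", 1, "philosophical")]),
   ("business", [("vocabulary", 2, "business")]),
   ("executive", [("vocabulary", 2, "business")]),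
   ("strategic", [("vocabulary", 2, "business")]),
   ("pragmatic", [("vocabulary", 2, "business")]),
   ("results-oriented", [("vocabulary", 2, "business")]),
   ("curious", [("speech_pattern", 0, "questioning")]),
   ("inquisitive", [("speech_pattern", 0, "questioning")]),
   ("socratic", [("speech_pattern", 0, "questioning")]),
   ("skeptical", [("speech_pattern", 0, "questioning")]),
   ("authoritative", [("speech_pattern", 1, "commanding")]),
   ("commanding", [("speech_pattern", 1, "commanding")]),
   ("decisive", [("speech_pattern", 1, "commanding")]),
   ("leadership", [("speech_pattern", 1, "commanding")]),
   ("dominant", [("speech_pattern", 1, "commanding")]),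
   ("storyteller", [("speech_pattern", 2, "elaborate")]),
   ("narrative", [("speech_pattern", 2, "elaborate")]),
   ("elaborate", [("speech_pattern", 2, "elaborate")]),
   ("descriptive", [("speech_pattern", 2, "elaborate")]),
   ("creative", [("speech_pattern", 2, "elaborate")])]

def pvDefaults : List (String × String) :=
  [("verbosity", "moderate"), ("formality", "neutral"), ("tone", "neutral"),
   ("vocabulary", "general"), ("speech_pattern", "direct")]

-- ordered archetype overrides: first keyword group found in the archetype id applies
def pvOverrides : List (List String × List (String × String)) :=
  [(["visionary", "dreamer"], [("vocabulary", "philosophical"), ("speech_pattern", "elaborate")]),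
   (["strategist", "analyst"], [("vocabulary", "technical"), ("verbosity", "moderate")]),
   (["leader", "executive"], [("speech_pattern", "commanding"), ("formality", "formal")])]

-- best-so-far update for one index effect (keep lower priority number)
def pvUpd (b : PySem.Dict String (Nat × String)) (e : String × Nat × String) : PySem.Dict String (Nat × String) :=
  match b.get? e.1 with
  | none => b.insert e.1 e.2
  | some cur => if e.2.1 < cur.1 then b.insert e.1 e.2 else b

def pvApplyOverride (style : PySem.Dict String String) (arch : String) :
    List (List String × List (String × String)) → PySem.Dict String String
  | [] => style
  | (kws, upds) :: rest =>
      if kws.any (fun k => PySem.Str.isIn k arch) then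
        upds.foldl (fun d p => d.insert p.1 p.2) style
      else pvApplyOverride style arch rest

def derive_speaking_style_py_alt (personality_traits : List String) (archetype_id : String) : List (String × String) :=
  let best : PySem.Dict String (Nat × String) :=
    personality_traits.foldl
      (fun b trait => ((PySem.Dict.mk pvIndex).getD (PySem.Str.lower trait) []).foldl pvUpd b)
      PySem.Dict.empty
  let style : PySem.Dict String String :=
    pvDefaults.foldl
      (fun d p => d.insert p.1 (match best.get? p.1 with | some rv => rv.2 | none => p.2))
      PySem.Dict.empty
  let archetype_lower := PySem.Str.lower archetype_id
  (pvApplyOverride style archetype_lower pvOverrides).items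

-- ===== PRECONDITION & SPEC =====
def Spec_derive_speaking_style_py (personality_traits : List String) (archetype_id : String) (out : List (String × String)) : Prop := out = derive_speaking_style_py_alt personality_traits archetype_id
instance (personality_traits : List String) (archetype_id : String) (out : List (String × String)) : Decidable (Spec_derive_speaking_style_py personality_traits archetype_id out) := by unfold Spec_derive_speaking_style_py; infer_instance

-- ===== CLAIM =====
def Claim_equal_derive_speaking_style_py : Prop := ∀ (personality_traits : List String) (archetype_id : String), Dom_derive_speaking_style_py personality_traits archetype_id → Spec_derive_speaking_style_py personality_traits archetype_id (derive_speaking_style_py personality_traits archetype_id)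

-- ===== LEMMAS AND PROOFS =====

-- min of two optional (priority, value) effects; earlier (left) wins ties
def mmin : Option (Nat × String) → Option (Nat × String) → Option (Nat × String)
  | none, e => e
  | some c, none => some c
  | some c, some n => if n.1 < c.1 then some n else some c

-- the best effect an entry list contributes to field f
def pvEff (f : String) (es : List (String × Nat × String)) : Option (Nat × String) :=
  es.foldl (fun o e => mmin o (if e.1 == f then some e.2 else none)) none

-- the effect one (lowered) trait word contributes to field f
def pvG (f s : String) : Option (Nat × String) := pvEff f ((PySem.Dict.mk pvIndex).getD s [])

-- the best effect a whole trait list contributes to field f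
def pvChain (f : String) (pt : List String) : Option (Nat × String) :=
  pt.foldl (fun o t => mmin o (pvG f (PySem.Str.lower t))) none

-- does any word of T equal s?
def pvHit (T : List String) (s : String) : Bool := T.any (fun w => w == s)

-- value of an optional effect, with a default
def pvVal (o : Option (Nat × String)) (dflt : String) : String :=
  match o with | some rv => rv.2 | none => dflt

-- shorthand for the style dict with its five fixed keys (proof-side only)
def pvD (a b c d e : String) : PySem.Dict String String :=
  PySem.Dict.mk [("verbosity", a), ("formality", b), ("tone", c), ("vocabulary", d), ("speech_pattern", e)]

theorem mmin_none_right (o : Option (Nat × String)) : mmin o none = o := by cases o <;> rfl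

theorem mmin_assoc (a b c : Option (Nat × String)) : mmin (mmin a b) c = mmin a (mmin b c) := by
  rcases a with _ | ⟨ra, va⟩
  · rfl
  · rcases b with _ | ⟨rb, vb⟩
    · rfl
    · rcases c with _ | ⟨rc, vc⟩
      · simp [mmin_none_right]
      · simp only [mmin]
        by_cases h1 : rb < ra <;> by_cases h2 : rc < rb
        · have h3 : rc < ra := by omega
          simp [h1, h2, h3]
        · simp [h1, h2]
        · simp [h1, h2]
        · have h3 : ¬ rc < ra := by omega
          simp [h1, h2, h3]

theorem pv_foldl_mmin {α : Type} (h : α → Option (Nat × String)) (l : List α) (o : Option (Nat × String)) :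
    l.foldl (fun o x => mmin o (h x)) o = mmin o (l.foldl (fun o x => mmin o (h x)) none) := by
  induction l generalizing o with
  | nil => simp [mmin_none_right]
  | cons x xs ih =>
      simp only [List.foldl_cons]
      rw [ih (mmin o (h x)), ih (mmin none (h x))]
      exact mmin_assoc o (h x) _

theorem pv_upd_get (b : PySem.Dict String (Nat × String)) (e : String × Nat × String) (f : String) :
    (pvUpd b e).get? f = mmin (b.get? f) (if e.1 == f then some e.2 else none) := by
  by_cases h : e.1 = f
  · subst h
    simp only [beq_self_eq_true, if_pos]
    unfold pvUpd
    cases hc : b.get? e.1 with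
    | none => simp [PySem.Dict.get?_insert_self, mmin]
    | some cur =>
        by_cases hlt : e.2.1 < cur.1
        · simp [hlt, PySem.Dict.get?_insert_self, mmin]
        · simp [hc, hlt, mmin]
  · have hb : (e.1 == f) = false := by simp [h]
    have h' : ¬ f = e.1 := fun hh => h hh.symm
    rw [hb]
    unfold pvUpd
    cases hc : b.get? e.1 with
    | none => simp [PySem.Dict.get?_insert, h', mmin_none_right]
    | some cur =>
        by_cases hlt : e.2.1 < cur.1
        · simp [hlt, PySem.Dict.get?_insert, h', mmin_none_right]
        · simp [hlt, mmin_none_right]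

theorem pv_eff_cons (f : String) (e : String × Nat × String) (es : List (String × Nat × String)) :
    pvEff f (e :: es) = mmin (if e.1 == f then some e.2 else none) (pvEff f es) := by
  simp only [pvEff, List.foldl_cons]
  rw [pv_foldl_mmin]
  rfl

theorem pv_inner (es : List (String × Nat × String)) (b : PySem.Dict String (Nat × String)) (f : String) :
    (es.foldl pvUpd b).get? f = mmin (b.get? f) (pvEff f es) := by
  induction es generalizing b with
  | nil => simp [pvEff, mmin_none_right]
  | cons e es ih =>
      simp only [List.foldl_cons]
      rw [ih, pv_upd_get, pv_eff_cons, mmin_assoc]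

theorem pv_chain_cons (f t : String) (ts : List String) :
    pvChain f (t :: ts) = mmin (pvG f (PySem.Str.lower t)) (pvChain f ts) := by
  simp only [pvChain, List.foldl_cons]
  rw [pv_foldl_mmin]
  rfl

theorem pv_best_aux (pt : List String) (b : PySem.Dict String (Nat × String)) (f : String) :
    ((pt.foldl (fun b trait => ((PySem.Dict.mk pvIndex).getD (PySem.Str.lower trait) []).foldl pvUpd b) b).get? f)
      = mmin (b.get? f) (pvChain f pt) := by
  induction pt generalizing b with
  | nil => simp [pvChain, mmin_none_right]
  | cons t ts ih =>
      simp only [List.foldl_cons]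
      rw [ih, pv_inner, pv_chain_cons, mmin_assoc]
      rfl

theorem pv_best (pt : List String) (f : String) :
    ((pt.foldl (fun b trait => ((PySem.Dict.mk pvIndex).getD (PySem.Str.lower trait) []).foldl pvUpd b) PySem.Dict.empty).get? f)
      = pvChain f pt := by
  rw [pv_best_aux]
  rfl

-- what one (lowered) word contributes to each of the five fields, field by field
theorem pv_g_char (s : String) :
    pvG "verbosity" s = (if pvHit ["intellectual", "philosophical", "verbose", "analytical", "academic", "professorial"] s then some ((0 : Nat), "verbose") else if pvHit ["reserved", "stoic", "practical", "military", "laconic", "quiet"] s then some (1, "terse") else none)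
  ∧ pvG "formality" s = (if pvHit ["aristocratic", "diplomatic", "refined", "proper", "dignified", "professional"] s then some ((0 : Nat), "formal") else if pvHit ["friendly", "casual", "folksy", "down-to-earth", "approachable", "relaxed"] s then some (1, "casual") else none)
  ∧ pvG "tone" s = (if pvHit ["warm", "empathetic", "caring", "nurturing", "kind", "compassionate"] s then some ((0 : Nat), "warm") else if pvHit ["cold", "calculating", "detached", "aloof", "distant", "clinical"] s then some (1, "cold") else if pvHit ["passionate", "fiery", "intense", "zealous", "fervent", "emotional"] s then some (2, "passionate") else none)
  ∧ pvG "vocabulary" s = (if pvHit ["technical", "engineer", "scientific", "analytical", "data-driven"] s then some ((0 : Nat), "technical") else if pvHit ["philosophical", "intellectual", "academic", "scholarly", "contemplative"] s then some (1, "philosophical") else if pvHit ["business", "executive", "strategic", "pragmatic", "results-oriented"] s then some (2, "business") else none)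
  ∧ pvG "speech_pattern" s = (if pvHit ["curious", "inquisitive", "socratic", "skeptical", "analytical"] s then some ((0 : Nat), "questioning") else if pvHit ["authoritative", "commanding", "decisive", "leadership", "dominant"] s then some (1, "commanding") else if pvHit ["storyteller", "narrative", "elaborate", "descriptive", "creative"] s then some (2, "elaborate") else none) := by
  by_cases h1 : ("intellectual" : String) = s
  · subst h1; decide
  by_cases h2 : ("philosophical" : String) = s
  · subst h2; decide
  by_cases h3 : ("verbose" : String) = s
  · subst h3; decide
  by_cases h4 : ("analytical" : String) = s
  · subst h4; decide
  by_cases h5 : ("academic" : String) = s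
  · subst h5; decide
  by_cases h6 : ("professorial" : String) = s
  · subst h6; decide
  by_cases h7 : ("reserved" : String) = s
  · subst h7; decide
  by_cases h8 : ("stoic" : String) = s
  · subst h8; decide
  by_cases h9 : ("practical" : String) = s
  · subst h9; decide
  by_cases h10 : ("military" : String) = s
  · subst h10; decide
  by_cases h11 : ("laconic" : String) = s
  · subst h11; decide
  by_cases h12 : ("quiet" : String) = s
  · subst h12; decide
  by_cases h13 : ("aristocratic" : String) = s
  · subst h13; decide
  by_cases h14 : ("diplomatic" : String) = s
  · subst h14; decide
  by_cases h15 : ("refined" : String) = s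
  · subst h15; decide
  by_cases h16 : ("proper" : String) = s
  · subst h16; decide
  by_cases h17 : ("dignified" : String) = s
  · subst h17; decide
  by_cases h18 : ("professional" : String) = s
  · subst h18; decide
  by_cases h19 : ("friendly" : String) = s
  · subst h19; decide
  by_cases h20 : ("casual" : String) = s
  · subst h20; decide
  by_cases h21 : ("folksy" : String) = s
  · subst h21; decide
  by_cases h22 : ("down-to-earth" : String) = s
  · subst h22; decide
  by_cases h23 : ("approachable" : String) = s
  · subst h23; decide
  by_cases h24 : ("relaxed" : String) = s
  · subst h24; decide
  by_cases h25 : ("warm" : String) = s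
  · subst h25; decide
  by_cases h26 : ("empathetic" : String) = s
  · subst h26; decide
  by_cases h27 : ("caring" : String) = s
  · subst h27; decide
  by_cases h28 : ("nurturing" : String) = s
  · subst h28; decide
  by_cases h29 : ("kind" : String) = s
  · subst h29; decide
  by_cases h30 : ("compassionate" : String) = s
  · subst h30; decide
  by_cases h31 : ("cold" : String) = s
  · subst h31; decide
  by_cases h32 : ("calculating" : String) = s
  · subst h32; decide
  by_cases h33 : ("detached" : String) = s
  · subst h33; decide
  by_cases h34 : ("aloof" : String) = s
  · subst h34; decide
  by_cases h35 : ("distant" : String) = s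
  · subst h35; decide
  by_cases h36 : ("clinical" : String) = s
  · subst h36; decide
  by_cases h37 : ("passionate" : String) = s
  · subst h37; decide
  by_cases h38 : ("fiery" : String) = s
  · subst h38; decide
  by_cases h39 : ("intense" : String) = s
  · subst h39; decide
  by_cases h40 : ("zealous" : String) = s
  · subst h40; decide
  by_cases h41 : ("fervent" : String) = s
  · subst h41; decide
  by_cases h42 : ("emotional" : String) = s
  · subst h42; decide
  by_cases h43 : ("technical" : String) = s
  · subst h43; decide
  by_cases h44 : ("engineer" : String) = s
  · subst h44; decide
  by_cases h45 : ("scientific" : String) = s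
  · subst h45; decide
  by_cases h46 : ("data-driven" : String) = s
  · subst h46; decide
  by_cases h47 : ("scholarly" : String) = s
  · subst h47; decide
  by_cases h48 : ("contemplative" : String) = s
  · subst h48; decide
  by_cases h49 : ("business" : String) = s
  · subst h49; decide
  by_cases h50 : ("executive" : String) = s
  · subst h50; decide
  by_cases h51 : ("strategic" : String) = s
  · subst h51; decide
  by_cases h52 : ("pragmatic" : String) = s
  · subst h52; decide
  by_cases h53 : ("results-oriented" : String) = s
  · subst h53; decide
  by_cases h54 : ("curious" : String) = s
  · subst h54; decide
  by_cases h55 : ("inquisitive" : String) = s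
  · subst h55; decide
  by_cases h56 : ("socratic" : String) = s
  · subst h56; decide
  by_cases h57 : ("skeptical" : String) = s
  · subst h57; decide
  by_cases h58 : ("authoritative" : String) = s
  · subst h58; decide
  by_cases h59 : ("commanding" : String) = s
  · subst h59; decide
  by_cases h60 : ("decisive" : String) = s
  · subst h60; decide
  by_cases h61 : ("leadership" : String) = s
  · subst h61; decide
  by_cases h62 : ("dominant" : String) = s
  · subst h62; decide
  by_cases h63 : ("storyteller" : String) = s
  · subst h63; decide
  by_cases h64 : ("narrative" : String) = s
  · subst h64; decide
  by_cases h65 : ("elaborate" : String) = s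
  · subst h65; decide
  by_cases h66 : ("descriptive" : String) = s
  · subst h66; decide
  by_cases h67 : ("creative" : String) = s
  · subst h67; decide
  refine ⟨?_, ?_, ?_, ?_, ?_⟩ <;>
    simp [pvG, pvIndex, pvEff, pvHit, mmin, PySem.Dict.getD_eq_get?_getD,
          PySem.Dict.get?, h1, h2, h3, h4, h5, h6, h7, h8, h9, h10, h11, h12, h13, h14, h15, h16, h17, h18, h19, h20, h21, h22, h23, h24, h25, h26, h27, h28, h29, h30, h31, h32, h33, h34, h35, h36, h37, h38, h39, h40, h41, h42, h43, h44, h45, h46, h47, h48, h49, h50, h51, h52, h53, h54, h55, h56, h57, h58, h59, h60, h61, h62, h63, h64, h65, h66, h67]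

theorem pv_mmin_chain2 (c0 c1 d0 d1 : Bool) (v0 v1 : String) :
    mmin (if c0 then some ((0 : Nat), v0) else if c1 then some (1, v1) else none)
         (if d0 then some ((0 : Nat), v0) else if d1 then some (1, v1) else none)
      = (if c0 || d0 then some ((0 : Nat), v0) else if c1 || d1 then some (1, v1) else none) := by
  cases c0 <;> cases c1 <;> cases d0 <;> cases d1 <;> rfl

theorem pv_mmin_chain3 (c0 c1 c2 d0 d1 d2 : Bool) (v0 v1 v2 : String) :
    mmin (if c0 then some ((0 : Nat), v0) else if c1 then some (1, v1) else if c2 then some (2, v2) else none)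
         (if d0 then some ((0 : Nat), v0) else if d1 then some (1, v1) else if d2 then some (2, v2) else none)
      = (if c0 || d0 then some ((0 : Nat), v0) else if c1 || d1 then some (1, v1) else if c2 || d2 then some (2, v2) else none) := by
  cases c0 <;> cases c1 <;> cases c2 <;> cases d0 <;> cases d1 <;> cases d2 <;> rfl

theorem pv_chain2 (f v0 v1 : String) (T0 T1 : List String)
    (hg : ∀ s, pvG f s = (if pvHit T0 s then some ((0 : Nat), v0) else if pvHit T1 s then some (1, v1) else none)) :
    ∀ pt : List String, pvChain f pt =
      (if pt.any (fun t => pvHit T0 (PySem.Str.lower t)) then some ((0 : Nat), v0)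
       else if pt.any (fun t => pvHit T1 (PySem.Str.lower t)) then some (1, v1) else none) := by
  intro pt
  induction pt with
  | nil => rfl
  | cons t ts ih =>
      rw [pv_chain_cons, hg, ih]
      simp only [List.any_cons]
      exact pv_mmin_chain2 _ _ _ _ _ _

theorem pv_chain3 (f v0 v1 v2 : String) (T0 T1 T2 : List String)
    (hg : ∀ s, pvG f s = (if pvHit T0 s then some ((0 : Nat), v0) else if pvHit T1 s then some (1, v1) else if pvHit T2 s then some (2, v2) else none)) :
    ∀ pt : List String, pvChain f pt =
      (if pt.any (fun t => pvHit T0 (PySem.Str.lower t)) then some ((0 : Nat), v0)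
       else if pt.any (fun t => pvHit T1 (PySem.Str.lower t)) then some (1, v1)
       else if pt.any (fun t => pvHit T2 (PySem.Str.lower t)) then some (2, v2) else none) := by
  intro pt
  induction pt with
  | nil => rfl
  | cons t ts ih =>
      rw [pv_chain_cons, hg, ih]
      simp only [List.any_cons]
      exact pv_mmin_chain3 _ _ _ _ _ _ _ _ _

theorem pv_val2 (c0 c1 : Bool) (v0 v1 dflt : String) :
    pvVal (if c0 then some ((0 : Nat), v0) else if c1 then some (1, v1) else none) dflt
      = (if c0 then v0 else if c1 then v1 else dflt) := by
  cases c0 <;> cases c1 <;> rfl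

theorem pv_val3 (c0 c1 c2 : Bool) (v0 v1 v2 dflt : String) :
    pvVal (if c0 then some ((0 : Nat), v0) else if c1 then some (1, v1) else if c2 then some (2, v2) else none) dflt
      = (if c0 then v0 else if c1 then v1 else if c2 then v2 else dflt) := by
  cases c0 <;> cases c1 <;> cases c2 <;> rfl

-- B's per-trait any-of-T test equals A's per-T-word membership test in the lowered list
theorem pv_swap (T : List String) (pt : List String) :
    pt.any (fun t => pvHit T (PySem.Str.lower t)) = T.any (fun w => (pt.map PySem.Str.lower).contains w) := by
  rw [Bool.eq_iff_iff]
  simp only [pvHit, List.any_eq_true, List.contains_iff_mem, List.mem_map, beq_iff_eq]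
  constructor
  · rintro ⟨t, ht, w, hw, he⟩
    exact ⟨w, hw, t, ht, he.symm⟩
  · rintro ⟨w, hw, t, ht, he⟩
    exact ⟨t, ht, w, hw, he.symm⟩

-- B's defaults-comprehension, spelt out over the five fixed fields
theorem pv_styleD (best : PySem.Dict String (Nat × String)) :
    pvDefaults.foldl
        (fun d p => d.insert p.1 (match best.get? p.1 with | some rv => rv.2 | none => p.2))
        PySem.Dict.empty
      = pvD (pvVal (best.get? "verbosity") "moderate") (pvVal (best.get? "formality") "neutral")
            (pvVal (best.get? "tone") "neutral") (pvVal (best.get? "vocabulary") "general")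
            (pvVal (best.get? "speech_pattern") "direct") := rfl

-- A's guarded lowercase list is just the map
theorem pv_tl_guard (pt : List String) :
    (if pt.isEmpty then ([] : List String) else pt.map PySem.Str.lower) = pt.map PySem.Str.lower := by
  cases pt <;> simp

-- A's guarded lowercase archetype is just the lowercase
theorem pv_arch_guard (aid : String) :
    (if aid.isEmpty then "" else PySem.Str.lower aid) = PySem.Str.lower aid := by
  by_cases h : aid.isEmpty
  · simp only [h, if_pos]
    rw [String.isEmpty_iff] at h
    subst h; rfl
  · simp [h]

-- A's five if/elif chains, one field at a time
theorem pv_fld1 (c1 c2 : Bool) (a b c d e : String) :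
    (if c1 then (pvD a b c d e).insert "verbosity" "verbose"
     else if c2 then (pvD a b c d e).insert "verbosity" "terse" else pvD a b c d e)
    = pvD (if c1 then "verbose" else if c2 then "terse" else a) b c d e := by
  split_ifs <;> rfl

theorem pv_fld2 (c1 c2 : Bool) (a b c d e : String) :
    (if c1 then (pvD a b c d e).insert "formality" "formal"
     else if c2 then (pvD a b c d e).insert "formality" "casual" else pvD a b c d e)
    = pvD a (if c1 then "formal" else if c2 then "casual" else b) c d e := by
  split_ifs <;> rfl

theorem pv_fld3 (c1 c2 c3 : Bool) (a b c d e : String) :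
    (if c1 then (pvD a b c d e).insert "tone" "warm"
     else if c2 then (pvD a b c d e).insert "tone" "cold"
     else if c3 then (pvD a b c d e).insert "tone" "passionate" else pvD a b c d e)
    = pvD a b (if c1 then "warm" else if c2 then "cold" else if c3 then "passionate" else c) d e := by
  split_ifs <;> rfl

theorem pv_fld4 (c1 c2 c3 : Bool) (a b c d e : String) :
    (if c1 then (pvD a b c d e).insert "vocabulary" "technical"
     else if c2 then (pvD a b c d e).insert "vocabulary" "philosophical"
     else if c3 then (pvD a b c d e).insert "vocabulary" "business" else pvD a b c d e)
    = pvD a b c (if c1 then "technical" else if c2 then "philosophical" else if c3 then "business" else d) e := by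
  split_ifs <;> rfl

theorem pv_fld5 (c1 c2 c3 : Bool) (a b c d e : String) :
    (if c1 then (pvD a b c d e).insert "speech_pattern" "questioning"
     else if c2 then (pvD a b c d e).insert "speech_pattern" "commanding"
     else if c3 then (pvD a b c d e).insert "speech_pattern" "elaborate" else pvD a b c d e)
    = pvD a b c d (if c1 then "questioning" else if c2 then "commanding" else if c3 then "elaborate" else e) := by
  split_ifs <;> rfl

-- A's archetype if/elif chain is B's first-match over the override table
theorem pv_arch (al : String) (a b c d e : String) :
    (if PySem.Str.isIn "visionary" al || PySem.Str.isIn "dreamer" al then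
       ((pvD a b c d e).insert "vocabulary" "philosophical").insert "speech_pattern" "elaborate"
     else if PySem.Str.isIn "strategist" al || PySem.Str.isIn "analyst" al then
       ((pvD a b c d e).insert "vocabulary" "technical").insert "verbosity" "moderate"
     else if PySem.Str.isIn "leader" al || PySem.Str.isIn "executive" al then
       ((pvD a b c d e).insert "speech_pattern" "commanding").insert "formality" "formal"
     else pvD a b c d e)
    = pvApplyOverride (pvD a b c d e) al pvOverrides := by
  simp only [pvApplyOverride, pvOverrides, List.any_cons, List.any_nil,
    Bool.or_false, List.foldl]

-- ===== VERDICT =====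
theorem derive_speaking_style_py_spec : Claim_equal_derive_speaking_style_py := by
  intro pt aid _
  show derive_speaking_style_py pt aid = derive_speaking_style_py_alt pt aid
  have hv := fun s => (pv_g_char s).1
  have hf := fun s => (pv_g_char s).2.1
  have hto := fun s => (pv_g_char s).2.2.1
  have hvo := fun s => (pv_g_char s).2.2.2.1
  have hsp := fun s => (pv_g_char s).2.2.2.2
  simp only [derive_speaking_style_py, derive_speaking_style_py_alt, pv_tl_guard, pv_arch_guard]
  rw [pv_styleD]
  simp only [pv_best, pv_chain2 _ _ _ _ _ hv, pv_chain2 _ _ _ _ _ hf,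
    pv_chain3 _ _ _ _ _ _ _ hto, pv_chain3 _ _ _ _ _ _ _ hvo, pv_chain3 _ _ _ _ _ _ _ hsp,
    pv_val2, pv_val3, pv_swap]
  rw [show PySem.Dict.ofList
        [("verbosity", "moderate"), ("formality", "neutral"), ("tone", "neutral"),
         ("vocabulary", "general"), ("speech_pattern", "direct")]
      = pvD "moderate" "neutral" "neutral" "general" "direct" from rfl]
  rw [pv_fld1, pv_fld2, pv_fld3, pv_fld4, pv_fld5, pv_arch]
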